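-- pv_equiv track=rewrite | github.com/dobizz/algorithms-and-data-structures | factorial.py | factorial_recursion_memo
-- ===== SOURCE A (Python) =====
-- def factorial_recursion_memo(n, memo={}):
--     if n in memo:
--         return memo[n]
--     elif n == 0:
--         return 1
--     else:
--         x = factorial_recursion_memo(n-1, memo) * n
--         memo[n] = x
--         return x
-- ===== SOURCE B (Python) =====
-- def factorial_recursion_memo(n, memo={}):
--     # Iterative version with an explicit stack instead of recursion.
--     # Mutates memo in place with exactly the same keys/order as the recursive A.
--     if n in memo:
--         return memo[n]
--     stack = []
--     k = n
--     while k not in memo and k != 0: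
--         stack.append(k)
--         k -= 1
--     result = memo[k] if k in memo else 1
--     while stack:
--         j = stack.pop()
--         result *= j
--         memo[j] = result
--     return result
-- ===== Notes on version B (the rewrite author's own statement) =====
-- stated objective: alternative
-- what changed: Replaces the recursive memoized descent by an explicit-stack iteration: uncached values are pushed while descending, then multiplied back up in one loop.
-- outside the precondition, e.g. on factorial_recursion_memo(-1, {-3: 2}): A returns 4, B returns 4; on factorial_recursion_memo(-1, {}): A raises RecursionError, B does not finish within the time limit
import Mathlib
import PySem

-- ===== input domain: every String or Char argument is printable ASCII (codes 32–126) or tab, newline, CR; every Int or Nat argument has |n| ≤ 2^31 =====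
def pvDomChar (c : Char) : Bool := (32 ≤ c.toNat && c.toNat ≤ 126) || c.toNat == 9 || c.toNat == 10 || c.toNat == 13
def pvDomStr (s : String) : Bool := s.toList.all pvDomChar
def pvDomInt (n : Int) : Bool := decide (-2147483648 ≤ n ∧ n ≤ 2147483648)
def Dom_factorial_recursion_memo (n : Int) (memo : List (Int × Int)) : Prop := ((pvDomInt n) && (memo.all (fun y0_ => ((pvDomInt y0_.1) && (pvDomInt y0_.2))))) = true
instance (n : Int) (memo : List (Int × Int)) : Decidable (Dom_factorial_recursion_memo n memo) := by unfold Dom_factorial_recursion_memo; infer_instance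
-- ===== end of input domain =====

-- B replaces A's recursive memoized descent by an explicit-stack iteration (alternative decomposition,
-- no speed claim). Both Pythons mutate `memo` in place with the same keys in the same order; the
-- equivalence proved here is about the RETURN value only.

-- ===== PORT A =====
-- Literal port of A. For n < 0 with no memo hit, Python's descent never terminates (RecursionError),
-- excluded by Pre_; the `0 < n` guard only makes the Lean recursion total there (value 0 is never claimed).
def factorial_recursion_memo (n : Int) (memo : List (Int × Int)) : Int :=
  match (PySem.Dict.mk memo).get? n with
  | some v => v
  | none =>
    if n = 0 then 1
    else if 0 < n then factorial_recursion_memo (n - 1) memo * n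
    else 0
termination_by n.toNat
decreasing_by omega

-- ===== PORT B =====
-- Source B's first while loop: descend from k pushing uncached values; state is (k, stack).
-- For k < 0 with no memo hit Source B loops forever (outside Pre_); the `0 < k` guard makes it total.
def factAltStack (k : Int) (memo : List (Int × Int)) (stack : List Int) : Int × List Int :=
  if ((PySem.Dict.mk memo).get? k).isNone ∧ k ≠ 0 then
    if 0 < k then factAltStack (k - 1) memo (stack ++ [k])
    else (k, stack)
  else (k, stack)
termination_by k.toNat
decreasing_by omega

def factorial_recursion_memo_alt (n : Int) (memo : List (Int × Int)) : Int :=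
  match (PySem.Dict.mk memo).get? n with
  | some v => v
  | none =>
    let p := factAltStack n memo []
    let base := match (PySem.Dict.mk memo).get? p.1 with
      | some v => v
      | none => 1
    -- Source B pops from the end of the appended stack: iterate the stack reversed
    p.2.reverse.foldl (fun r j => r * j) base

-- ===== PRECONDITION & SPEC =====
-- Pre_ excludes negative n not already a key of memo: there A's unbounded descent raises
-- RecursionError unless a memo key ≤ n happens to stop it (a rare accident, excluded as well;
-- B returns the same value on those rare inputs, see cites).
def Pre_factorial_recursion_memo (n : Int) (memo : List (Int × Int)) : Prop :=
  0 ≤ n ∨ ((PySem.Dict.mk memo).get? n).isSome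
instance (n : Int) (memo : List (Int × Int)) : Decidable (Pre_factorial_recursion_memo n memo) := by
  unfold Pre_factorial_recursion_memo; infer_instance

def pvWitness_factorial_recursion_memo : Int × (List (Int × Int)) := (6, [(3, 6)])

def Spec_factorial_recursion_memo (n : Int) (memo : List (Int × Int)) (out : Int) : Prop := out = factorial_recursion_memo_alt n memo
instance (n : Int) (memo : List (Int × Int)) (out : Int) : Decidable (Spec_factorial_recursion_memo n memo out) := by unfold Spec_factorial_recursion_memo; infer_instance

-- ===== CLAIM (what is proved, stated in full; the proofs are below) =====
def Claim_equal_factorial_recursion_memo : Prop := ∀ (n : Int) (memo : List (Int × Int)), Dom_factorial_recursion_memo n memo → Pre_factorial_recursion_memo n memo → Spec_factorial_recursion_memo n memo (factorial_recursion_memo n memo)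

-- ===== LEMMAS AND PROOFS =====

-- Core invariant: for 0 ≤ n, running the stack-building loop from (n, acc) and multiplying back up
-- computes acc (reversed) folded onto A's recursive value at n.
theorem factAlt_key (N : Nat) (n : Int) (hN : n.toNat ≤ N) (h0 : 0 ≤ n)
    (memo : List (Int × Int)) (acc : List Int) :
    (let p := factAltStack n memo acc
     p.2.reverse.foldl (fun r j => r * j)
       (match (PySem.Dict.mk memo).get? p.1 with | some v => v | none => 1))
    = acc.reverse.foldl (fun r j => r * j) (factorial_recursion_memo n memo) := by
  induction N generalizing n acc with
  | zero =>
    have hn : n = 0 := by omega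
    subst hn
    rw [factAltStack, factorial_recursion_memo]
    cases hg : (PySem.Dict.mk memo).get? 0 <;> simp [hg]
  | succ N ih =>
    rw [factAltStack, factorial_recursion_memo]
    cases hg : (PySem.Dict.mk memo).get? n with
    | some v => simp [hg]
    | none =>
      by_cases hz : n = 0
      · subst hz; simp [hg]
      · have hpos : 0 < n := by omega
        simp only [hg, Option.isNone_none, hz, if_pos, true_and, if_pos hpos, ne_eq,
          not_false_eq_true]
        rw [ih (n - 1) (by omega) (by omega) (acc ++ [n])]
        simp

-- ===== VERDICT (by name: the statement is the Claim_ definition above) =====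
theorem factorial_recursion_memo_spec : Claim_equal_factorial_recursion_memo := by
  intro n memo _hdom hpre
  unfold Spec_factorial_recursion_memo factorial_recursion_memo_alt
  cases hg : (PySem.Dict.mk memo).get? n with
  | some v =>
    rw [factorial_recursion_memo]
    simp [hg]
  | none =>
    have h0 : 0 ≤ n := by
      rcases hpre with h | h
      · exact h
      · rw [hg] at h; simp at h
    simpa using (factAlt_key n.toNat n le_rfl h0 memo []).symm
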